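-- pv_equiv track=rewrite | github.com/YamiYume/crypto_monkas_backend | crypto_monkas_backend/common/lazyutils.py | decRabin
-- ===== SOURCE A (Python) =====
-- from typing import List
--
-- def euclidExt(a : int, b : int):
--     # Algoritmo extendido de euclides
--     # Usado para calcular el inverso multiplicativo de a modulo b.
--     # Pues por el teorema de Bezout:
--     #   ax + by = (MAXIMO DIVISOR DE a Y b)
--     # y si no tienen factores en comun, entonces:
--     #   ax + by = 1.
--     #   ax = 1 (mod b)
--     r0, r1, s0, t0, s1, t1 = a, b, 1, 0, 0, 1
--     while r1 != 0:
--         temp1, temp2 = s1, t1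
--         s1 = s0 - (r0 // r1) * s1
--         t1 = t0 - (r0 // r1) * t1
--         s0 = temp1
--         t0 = temp2
--         temp = r1
--         r1 = r0 % r1
--         r0 = temp
--     return s0, t0
--
-- def modInverse(a : int, n : int):
--     # Calcula el inverso multiplicativo de a modulo n
--     # Es decir:
--     # modInverse(a, n) * a = 1 (mod n)
--     inv, trash = euclidExt(a, n)
--     while inv < 0:
--         inv += n
--     return inv % n
--
-- def TCR(lista, listb):
--     # Teorema Chino del residuo. Si
--     # lista = [a0, a1, a2, ..., an]
--     # listb = [b0, b1, b2, ..., bn]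
--     # Donde los ai son coprimos dos a dos. Entonces
--     # X = TCR(lista, listb) es la solucion al sistema de congruencias
--     # x = b0 (mod a0)
--     # x = b1 (mod a1)
--     # ...
--     # x = bn (mod an)
--     m = 1
--     for a in lista:
--         m *= a
--     M = [m // a for a in lista]
--     invM = [modInverse(M[i], lista[i]) for i in range(len(M))]
--     result = 0
--     for i in range(len(M)):
--         result += (listb[i] * M[i] * invM[i]) % m
--     return result % m
--
-- def expMod(b : int, e : int, m : int):
--     # Calcula b**e modulo m
--     r = 1
--     if 1 & e:
--         r = b
--     while e:
--         e >>= 1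
--         b = (b * b) % m
--         if e & 1: r = (r * b) % m
--     return r
--
-- def decRabin(numberlist: List[int], B : int, p : int, q : int):
--     inv2 = modInverse(2, p * q)
--     inv4 = inv2 * inv2 % (p * q)
--     sol = []
--     for n in numberlist:
--         temp = inv4 * B ** 2 + n
--         powers = [expMod(temp, (p + 1) // 4, p), expMod(temp, (q + 1) // 4, q)]
--         roots = [TCR([p, q], powers),
--                  TCR([p, q], [powers[0], -powers[1]]),
--                  TCR([p, q], [-powers[0], powers[1]]),
--                  TCR([p, q], [-powers[0], -powers[1]])]
--         t = []
--         for r in roots: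
--             number = r - inv2 * B
--             t.append(number % (p * q))
--         sol.append(t)
--     return sol
-- ===== SOURCE B (Python) =====
-- from typing import List
--
-- def euclidExt(a : int, b : int):
--     r0, r1, s0, t0, s1, t1 = a, b, 1, 0, 0, 1
--     while r1 != 0:
--         temp1, temp2 = s1, t1
--         s1 = s0 - (r0 // r1) * s1
--         t1 = t0 - (r0 // r1) * t1
--         s0 = temp1
--         t0 = temp2
--         temp = r1
--         r1 = r0 % r1
--         r0 = temp
--     return s0, t0
--
-- def modInverse(a : int, n : int):
--     inv, trash = euclidExt(a, n)
--     while inv < 0: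
--         inv += n
--     return inv % n
--
-- def expMod(b : int, e : int, m : int):
--     r = 1
--     if 1 & e:
--         r = b
--     while e:
--         e >>= 1
--         b = (b * b) % m
--         if e & 1: r = (r * b) % m
--     return r
--
-- def decRabin(numberlist: List[int], B : int, p : int, q : int):
--     # CRT basis precomputed once; the two negated roots derived by negation.
--     m = p * q
--     inv2 = modInverse(2, m)
--     inv4 = inv2 * inv2 % m
--     cp = q * modInverse(q, p) % m
--     cq = p * modInverse(p, q) % m
--     shift = inv2 * B
--     ep, eq = (p + 1) // 4, (q + 1) // 4
--     sol = []
--     for n in numberlist: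
--         t = inv4 * B * B + n
--         u = expMod(t, ep, p) * cp
--         v = expMod(t, eq, q) * cq
--         sol.append([(u + v - shift) % m, (u - v - shift) % m,
--                     (v - u - shift) % m, (-u - v - shift) % m])
--     return sol
-- ===== Notes on version B (the rewrite author's own statement) =====
-- stated objective: faster
-- what changed: B precomputes the two CRT basis elements cp = q*modInverse(q,p) % m and cq = p*modInverse(p,q) % m once before the loop and, per ciphertext, forms the roots as linear combinations u±v of rp*cp and rq*cq (the two negated roots obtained by negation), dropping the generic TCR routine and its four calls (eight extended-gcd inverses) per ciphertext.
-- outside the precondition, e.g. on decRabin([3], 1, -1, 3): A returns [[0, -2, 0, -2]], B returns [[0, -2, 0, -2]]; on decRabin([3], 1, 5, -1): A returns [[0, 0, -4, -4]], B returns [[0, 0, -4, -4]]; on decRabin([], 9, -2, -17): A returns [], B does not finish within the time limit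
import Mathlib
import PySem

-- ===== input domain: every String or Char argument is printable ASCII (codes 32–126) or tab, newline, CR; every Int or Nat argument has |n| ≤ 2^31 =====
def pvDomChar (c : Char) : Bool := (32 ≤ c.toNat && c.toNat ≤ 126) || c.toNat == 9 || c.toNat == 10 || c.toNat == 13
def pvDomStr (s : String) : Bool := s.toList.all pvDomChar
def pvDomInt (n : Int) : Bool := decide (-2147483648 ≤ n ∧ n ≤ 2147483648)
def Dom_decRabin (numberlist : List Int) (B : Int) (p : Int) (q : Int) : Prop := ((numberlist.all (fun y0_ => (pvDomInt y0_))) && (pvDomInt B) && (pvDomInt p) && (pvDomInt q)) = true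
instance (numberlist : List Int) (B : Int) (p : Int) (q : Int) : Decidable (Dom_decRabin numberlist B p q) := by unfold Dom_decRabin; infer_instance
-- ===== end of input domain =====

-- B precomputes the two CRT basis elements once and derives the two negated square
-- roots by negation, instead of calling the generic CRT routine four times per ciphertext.

-- ===== PORT A =====

-- Python's `while r1 != 0` in euclidExt; |r0 % r1| < |r1| makes it terminate on every input.
theorem pvNatAbsModLt (r0 r1 : Int) (h : r1 ≠ 0) :
    (PySem.Int.mod r0 r1).natAbs < r1.natAbs := by
  rcases lt_or_gt_of_ne h with hn | hp
  · have := PySem.Int.mod_neg_bounds (a := r0) hn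
    omega
  · have h1 := PySem.Int.mod_nonneg (a := r0) hp
    have h2 := PySem.Int.mod_lt (a := r0) hp
    omega

def euclidExtLoop (r0 r1 s0 t0 s1 t1 : Int) : Int × Int :=
  if h : r1 ≠ 0 then
    euclidExtLoop r1 (PySem.Int.mod r0 r1) s1 t1
      (s0 - PySem.Int.floordiv r0 r1 * s1) (t0 - PySem.Int.floordiv r0 r1 * t1)
  else (s0, t0)
termination_by r1.natAbs
decreasing_by exact pvNatAbsModLt r0 r1 h

def euclidExt (a b : Int) : Int × Int := euclidExtLoop a b 1 0 0 1

-- Python's `while inv < 0: inv += n` diverges when n ≤ 0; the `0 < n` guard makes the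
-- port total and is exact wherever the Python loop terminates normally with n > 0
-- (inputs where it diverges are outside Pre_).
def fixNeg (inv n : Int) : Int :=
  if _h : inv < 0 ∧ 0 < n then fixNeg (inv + n) n else inv
termination_by (-inv).toNat
decreasing_by omega

def modInverse (a n : Int) : Int := PySem.Int.mod (fixNeg (euclidExt a n).1 n) n

-- Python's `while e:` loop; for e < 0 Python diverges (excluded by Pre_), so the loop
-- guard is `0 < e`, exact for every e ≥ 0; `e >>= 1` is `e >>> 1` (Python-exact).
def expModLoop (b e m r : Int) : Int :=
  if _h : 0 < e then
    let e' := e >>> (1 : Nat)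
    let b' := PySem.Int.mod (b * b) m
    expModLoop b' e' m (if PySem.Int.band e' 1 ≠ 0 then PySem.Int.mod (r * b') m else r)
  else r
termination_by e.toNat
decreasing_by
  have : e >>> (1 : Nat) = e / 2 := by
    simp [Int.shiftRight_eq_div_pow]
  simp only [this]
  omega

def expMod (b e m : Int) : Int :=
  expModLoop b e m (if PySem.Int.band 1 e ≠ 0 then b else 1)

-- TCR: indexing uses pyGetD (exact here: decRabin only calls it with equal-length lists)
-- and floordiv (exact: the moduli are nonzero under Pre_).
def TCR (lista listb : List Int) : Int :=
  let m := lista.foldl (fun m a => m * a) 1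
  let M := lista.map (fun a => PySem.Int.floordiv m a)
  let invM := (PySem.List.pyRange 0 (PySem.List.len M) 1).map
    (fun i => modInverse (PySem.List.pyGetD M i 0) (PySem.List.pyGetD lista i 0))
  let result := (PySem.List.pyRange 0 (PySem.List.len M) 1).foldl
    (fun result i => result +
      PySem.Int.mod (PySem.List.pyGetD listb i 0 * PySem.List.pyGetD M i 0 *
        PySem.List.pyGetD invM i 0) m) 0
  PySem.Int.mod result m

def decRabin (numberlist : List Int) (B : Int) (p : Int) (q : Int) : List (List Int) :=
  let inv2 := modInverse 2 (p * q)
  let inv4 := PySem.Int.mod (inv2 * inv2) (p * q)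
  numberlist.foldl (fun sol n =>
    let temp := inv4 * B ^ 2 + n
    let powers := [expMod temp (PySem.Int.floordiv (p + 1) 4) p,
                   expMod temp (PySem.Int.floordiv (q + 1) 4) q]
    let roots := [TCR [p, q] powers,
                  TCR [p, q] [PySem.List.pyGetD powers 0 0, -PySem.List.pyGetD powers 1 0],
                  TCR [p, q] [-PySem.List.pyGetD powers 0 0, PySem.List.pyGetD powers 1 0],
                  TCR [p, q] [-PySem.List.pyGetD powers 0 0, -PySem.List.pyGetD powers 1 0]]
    let t := roots.foldl (fun t r => t ++ [PySem.Int.mod (r - inv2 * B) (p * q)]) []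
    sol ++ [t]) []

-- ===== PORT B =====
def decRabin_alt (numberlist : List Int) (B : Int) (p : Int) (q : Int) : List (List Int) :=
  let m := p * q
  let inv2 := modInverse 2 m
  let inv4 := PySem.Int.mod (inv2 * inv2) m
  let cp := PySem.Int.mod (q * modInverse q p) m
  let cq := PySem.Int.mod (p * modInverse p q) m
  let shift := inv2 * B
  let ep := PySem.Int.floordiv (p + 1) 4
  let eq := PySem.Int.floordiv (q + 1) 4
  numberlist.map (fun n =>
    let t := inv4 * B * B + n
    let u := expMod t ep p * cp
    let v := expMod t eq q * cq
    [PySem.Int.mod (u + v - shift) m, PySem.Int.mod (u - v - shift) m,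
     PySem.Int.mod (v - u - shift) m, PySem.Int.mod (-u - v - shift) m])

-- ===== PRECONDITION & SPEC =====
-- Pre_ excludes nonpositive p or q (no Rabin moduli): there A raises
-- ZeroDivisionError (p*q = 0) or diverges in modInverse's negativity loop /
-- expMod's shift loop on a negative exponent, except on the degenerate lines
-- p = -1 or q = -1 and on the empty numberlist (where A returns before touching
-- the per-element work); those residual degenerate returns are excluded as well.
def Pre_decRabin (numberlist : List Int) (B : Int) (p : Int) (q : Int) : Prop :=
  1 ≤ p ∧ 1 ≤ q
instance (numberlist : List Int) (B : Int) (p : Int) (q : Int) : Decidable (Pre_decRabin numberlist B p q) := by unfold Pre_decRabin; infer_instance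

def pvWitness_decRabin : List Int × Int × Int × Int := ([5, 12], 3, 7, 11)

def Spec_decRabin (numberlist : List Int) (B : Int) (p : Int) (q : Int) (out : List (List Int)) : Prop := out = decRabin_alt numberlist B p q
instance (numberlist : List Int) (B : Int) (p : Int) (q : Int) (out : List (List Int)) : Decidable (Spec_decRabin numberlist B p q out) := by unfold Spec_decRabin; infer_instance

-- ===== CLAIM (what is proved, stated in full; the proofs are below) =====
def Claim_equal_decRabin : Prop := ∀ (numberlist : List Int) (B : Int) (p : Int) (q : Int), Dom_decRabin numberlist B p q → Pre_decRabin numberlist B p q → Spec_decRabin numberlist B p q (decRabin numberlist B p q)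

-- ===== LEMMAS AND PROOFS =====
theorem pvBase (m z : Int) : z % m ≡ z [ZMOD m] := Int.emod_emod_of_dvd z dvd_rfl
theorem pvEq (m : Int) {a b : Int} (h : a = b) : a ≡ b [ZMOD m] := by rw [h]
theorem pvCong (m : Int) {a b c : Int} (ha : a ≡ c [ZMOD m]) (hb : b ≡ c [ZMOD m]) :
    a % m = b % m := ha.trans hb.symm
theorem pvMain (nl : List Int) (B p q : Int) (hp : 1 ≤ p) (hq : 1 ≤ q) :
    decRabin nl B p q = decRabin_alt nl B p q := by
  have hp0 : p ≠ 0 := by omega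
  have hq0 : q ≠ 0 := by omega
  have hm : (0:Int) < p * q := mul_pos (by omega) (by omega)
  have hfdp : PySem.Int.floordiv (p * q) p = q := by
    rw [PySem.Int.floordiv_eq_ediv_of_pos (by omega), Int.mul_ediv_cancel_left q hp0]
  have hfdq : PySem.Int.floordiv (p * q) q = p := by
    rw [PySem.Int.floordiv_eq_ediv_of_pos (by omega), Int.mul_ediv_cancel p hq0]
  unfold decRabin decRabin_alt
  simp only [PySem.List.foldl_append_singleton_eq_map, List.nil_append]
  apply List.map_congr_left
  intro n _
  simp only [TCR, PySem.List.len_eq, List.length_map, List.length_cons, List.length_nil]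
  simp [PySem.List.pyGetD_ofNat', PySem.List.pyRange_one_cons, PySem.List.pyRange_one_eq_nil,
    hfdp, hfdq, PySem.Int.mod_eq_emod_of_pos hm, pow_two, ← mul_assoc]
  set m := p * q with hmdef
  set i0 := modInverse q p with hi0
  set i1 := modInverse p q with hi1
  set s := modInverse 2 m * B with hs
  set t := (modInverse 2 m * modInverse 2 m) % m * B * B + n with ht
  set rp := expMod t ((p + 1) / 4) p with hrp
  set rq := expMod t ((q + 1) / 4) q with hrq
  refine ⟨?_, ?_, ?_, ?_⟩
  · exact pvCong m (c := rp * (q * i0) + rq * (p * i1) - s) (pvEq m (by ring))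
      ((((pvBase m (q * i0)).mul_left rp).add ((pvBase m (p * i1)).mul_left rq)).sub_right s)
  · exact pvCong m (c := rp * (q * i0) - rq * (p * i1) - s) (pvEq m (by ring))
      ((((pvBase m (q * i0)).mul_left rp).sub ((pvBase m (p * i1)).mul_left rq)).sub_right s)
  · exact pvCong m (c := rq * (p * i1) - rp * (q * i0) - s) (pvEq m (by ring))
      (((pvBase m (p * i1)).mul_left rq).sub ((pvBase m (q * i0)).mul_left rp) |>.sub_right s)
  · exact pvCong m (c := -(rp * (q * i0)) - rq * (p * i1) - s) (pvEq m (by ring))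
      ((((pvBase m (q * i0)).mul_left rp).neg.sub ((pvBase m (p * i1)).mul_left rq)).sub_right s)

-- ===== VERDICT (by name: the statement is the Claim_ definition above) =====
theorem decRabin_spec : Claim_equal_decRabin := by
  intro numberlist B p q _dom hpre
  unfold Spec_decRabin
  exact pvMain numberlist B p q hpre.1 hpre.2
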